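-- pv_equiv track=rewrite | github.com/chulchultrain/FriendLeague | stats/aggregation.py | aggregation_function
-- ===== SOURCE A (Python) =====
-- def aggregation_function(init_map,aggregated_stats):
--     res = {}
--     if init_map is None:
--         res = aggregated_stats
--     else:
--         for x in aggregated_stats:
--             if x not in init_map:
--                 res[x] = aggregated_stats[x]
--             else:
--                 res[x] = aggregated_stats[x] + init_map[x]
--     return res
-- ===== SOURCE B (Python) =====
-- def aggregation_function(init_map, aggregated_stats):
--     if init_map is None:
--         return aggregated_stats
--     res = dict(aggregated_stats)
--     for x in init_map:
--         if x in res: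
--             res[x] = res[x] + init_map[x]
--     return res
-- ===== Notes on version B (the rewrite author's own statement) =====
-- stated objective: idiomatic
-- what changed: B starts from a shallow copy of aggregated_stats and iterates over init_map's keys, adding into existing entries, instead of A's loop over aggregated_stats' keys that rebuilds the result dict with a membership branch per key.
import Mathlib
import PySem

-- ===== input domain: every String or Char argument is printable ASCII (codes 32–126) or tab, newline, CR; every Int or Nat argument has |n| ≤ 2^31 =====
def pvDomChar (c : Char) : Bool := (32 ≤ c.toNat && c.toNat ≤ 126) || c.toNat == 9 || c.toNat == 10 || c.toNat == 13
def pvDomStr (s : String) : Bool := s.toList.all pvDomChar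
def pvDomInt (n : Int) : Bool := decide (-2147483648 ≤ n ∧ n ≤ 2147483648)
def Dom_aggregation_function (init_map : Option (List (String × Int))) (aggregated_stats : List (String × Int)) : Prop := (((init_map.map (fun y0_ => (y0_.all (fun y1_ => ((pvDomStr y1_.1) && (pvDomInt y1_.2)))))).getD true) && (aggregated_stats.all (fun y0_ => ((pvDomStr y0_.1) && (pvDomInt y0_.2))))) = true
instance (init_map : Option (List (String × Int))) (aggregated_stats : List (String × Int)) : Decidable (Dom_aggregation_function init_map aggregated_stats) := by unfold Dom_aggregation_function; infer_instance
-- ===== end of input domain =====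

-- B copies aggregated_stats once and then adds init_map's entries into the existing keys,
-- instead of A's per-key membership branch while rebuilding the dict; same return value.
-- (In Python, the None branch of both returns the aggregated_stats object itself.)

-- ===== PORT A =====
-- dicts are association lists (lookup = first match); iterating a dict visits its
-- distinct keys in first-occurrence order, hence PySem.List.dedup over the key list.
def aggregation_function (init_map : Option (List (String × Int))) (aggregated_stats : List (String × Int)) : List (String × Int) :=
  match init_map with
  | none => aggregated_stats
  | some m =>
    -- for x in aggregated_stats: res[x] = … (fresh distinct keys, so dict assignment appends)
    (PySem.List.dedup (aggregated_stats.map (·.1))).foldl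
      (fun res x =>
        if ((m.map (·.1)).contains x) = false then
          res ++ [(x, (List.lookup x aggregated_stats).getD 0)]
        else
          res ++ [(x, (List.lookup x aggregated_stats).getD 0 + (List.lookup x m).getD 0)])
      []

-- ===== PORT B =====
def aggregation_function_alt (init_map : Option (List (String × Int))) (aggregated_stats : List (String × Int)) : List (String × Int) :=
  match init_map with
  | none => aggregated_stats
  | some m =>
    -- res = dict(aggregated_stats): a copy of the dict (distinct keys, first-match values)
    let res0 : List (String × Int) :=
      (PySem.List.dedup (aggregated_stats.map (·.1))).map
        (fun k => (k, (List.lookup k aggregated_stats).getD 0))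
    -- for x in init_map: if x in res: res[x] = res[x] + init_map[x]  (in-place update)
    (PySem.List.dedup (m.map (·.1))).foldl
      (fun res x =>
        if (res.map (·.1)).contains x then
          res.map (fun p => if p.1 == x then (p.1, p.2 + (List.lookup x m).getD 0) else p)
        else res)
      res0

-- ===== PRECONDITION & SPEC =====
def Spec_aggregation_function (init_map : Option (List (String × Int))) (aggregated_stats : List (String × Int)) (out : List (String × Int)) : Prop := out = aggregation_function_alt init_map aggregated_stats
instance (init_map : Option (List (String × Int))) (aggregated_stats : List (String × Int)) (out : List (String × Int)) : Decidable (Spec_aggregation_function init_map aggregated_stats out) := by unfold Spec_aggregation_function; infer_instance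

-- ===== CLAIM (what is proved, stated in full; the proofs are below) =====
def Claim_equal_aggregation_function : Prop := ∀ (init_map : Option (List (String × Int))) (aggregated_stats : List (String × Int)), Dom_aggregation_function init_map aggregated_stats → Spec_aggregation_function init_map aggregated_stats (aggregation_function init_map aggregated_stats)

-- ===== LEMMAS AND PROOFS =====

-- A's loop appends one pair per key, so it is a map over the key list.
theorem portA_eq_map (m aggregated_stats : List (String × Int)) :
    aggregation_function (some m) aggregated_stats
      = (PySem.List.dedup (aggregated_stats.map (·.1))).map
          (fun k => (k,
            if ((m.map (·.1)).contains k) = false then (List.lookup k aggregated_stats).getD 0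
            else (List.lookup k aggregated_stats).getD 0 + (List.lookup k m).getD 0)) := by
  show List.foldl _ [] _ = _
  have hstep : (fun (res : List (String × Int)) x =>
        if ((m.map (·.1)).contains x) = false then
          res ++ [(x, (List.lookup x aggregated_stats).getD 0)]
        else
          res ++ [(x, (List.lookup x aggregated_stats).getD 0 + (List.lookup x m).getD 0)])
      = fun res x => res ++
          [(x, if ((m.map (·.1)).contains x) = false then (List.lookup x aggregated_stats).getD 0
               else (List.lookup x aggregated_stats).getD 0 + (List.lookup x m).getD 0)] := by
    funext res x; split <;> rfl
  rw [hstep, PySem.List.foldl_append_singleton_eq_map]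
  simp

-- B's update loop over a nodup key list l, acting on a dict of the form keys.map (k, f k):
-- each present key gets its init_map value added exactly once.
theorem loopB (m : List (String × Int)) (keys : List String)
    (l : List String) (hl : l.Nodup) (f : String → Int) :
    l.foldl
      (fun res x =>
        if (res.map (·.1)).contains x then
          res.map (fun p => if p.1 == x then (p.1, p.2 + (List.lookup x m).getD 0) else p)
        else res)
      (keys.map (fun k => (k, f k)))
    = keys.map (fun k => (k,
        if l.contains k then f k + (List.lookup k m).getD 0 else f k)) := by
  induction l generalizing f with
  | nil => simp
  | cons x l ih =>
    have hl' : l.Nodup := hl.of_cons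
    have hxl : x ∉ l := (List.nodup_cons.mp hl).1
    simp only [List.foldl_cons]
    have hkeys : ((keys.map (fun k => (k, f k))).map (·.1)) = keys := by
      simp [Function.comp_def]
    rw [hkeys]
    by_cases hc : keys.contains x
    · rw [if_pos hc]
      have hupd : ((keys.map (fun k => (k, f k))).map
            (fun p => if p.1 == x then (p.1, p.2 + (List.lookup x m).getD 0) else p))
          = keys.map (fun k => (k, if k == x then f k + (List.lookup x m).getD 0 else f k)) := by
        rw [List.map_map]
        apply List.map_congr_left
        intro k _
        by_cases hk : k = x <;> simp [hk]
      rw [hupd, ih hl']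
      apply List.map_congr_left
      intro k _
      by_cases hk : k = x
      · subst hk
        simp
        exact fun h => absurd h hxl
      · simp [List.contains_cons, hk]
    · rw [if_neg hc]
      rw [ih hl']
      apply List.map_congr_left
      intro k hk
      have hkx : k ≠ x := by
        rintro rfl
        exact hc (by simpa [List.contains_iff_mem] using hk)
      simp [hkx]

-- ===== VERDICT (by name: the statement is the Claim_ definition above) =====
theorem aggregation_function_spec : Claim_equal_aggregation_function := by
  intro init_map aggregated_stats _
  unfold Spec_aggregation_function
  match init_map with
  | none => rfl
  | some m =>
    rw [portA_eq_map]
    show _ = List.foldl _ _ _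
    rw [loopB m _ _ (PySem.List.nodup_dedup (m.map (·.1)))]
    apply List.map_congr_left
    intro k _
    have hmem : (PySem.List.dedup (m.map (·.1))).contains k = (m.map (·.1)).contains k := by
      simp [List.contains_iff_mem]
    rw [hmem]
    rcases Bool.eq_false_or_eq_true ((m.map (·.1)).contains k) with h | h <;> rw [h] <;> simp
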